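-- pv_equiv track=rewrite | github.com/joshesol19/campuslytics | python/analysis.py | _normalize_ai_html
-- ===== SOURCE A (Python) =====
-- def _escape_html(s: str) -> str:
--     return (
--         s.replace("&", "&amp;")
--         .replace("<", "&lt;")
--         .replace(">", "&gt;")
--         .replace('"', "&quot;")
--         .replace("'", "&#39;")
--     )
--
-- def _normalize_ai_html(content: str, fallback: str) -> str:
--     """
--     Models sometimes return markdown-style bullets (e.g. "* item") or plain text.
--     Browsers collapse raw newlines, so we convert common bullet patterns to
--     real HTML (<ul><li>...</li></ul>) and always return a single <div> wrapper.
--     """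
--     if not content or not content.strip():
--         return fallback
--
--     trimmed = content.strip()
--
--     # If it already looks like HTML, keep it; ensure we have a wrapper <div>.
--     if "<" in trimmed and "</" in trimmed:
--         if trimmed.lower().startswith("<div"):
--             return trimmed
--         return f"<div>{trimmed}</div>"
--
--     # Plain text / markdown-ish: convert bullets + paragraphs.
--     lines = trimmed.splitlines()
--     out: list[str] = ["<div>"]
--     in_list = False
--     saw_bullets = False
--
--     for raw in lines:
--         line = raw.rstrip()
--         stripped = line.lstrip()
--         is_bullet = stripped.startswith("* ") or stripped.startswith("- ")
--
--         if is_bullet: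
--             saw_bullets = True
--             if not in_list:
--                 out.append("<ul>")
--                 in_list = True
--             out.append(f"<li>{_escape_html(stripped[2:].strip())}</li>")
--             continue
--
--         if in_list:
--             out.append("</ul>")
--             in_list = False
--
--         if stripped == "":
--             out.append("<br>")
--         else:
--             out.append(f"<p>{_escape_html(stripped)}</p>")
--
--     if in_list:
--         out.append("</ul>")
--
--     out.append("</div>")
--
--     if not saw_bullets:
--         return f"<div><p>{_escape_html(trimmed)}</p></div>"
--
--     return "\n".join(out)
-- ===== SOURCE B (Python) =====
-- def _escape_html(s: str) -> str:
--     return (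
--         s.replace("&", "&amp;")
--         .replace("<", "&lt;")
--         .replace(">", "&gt;")
--         .replace('"', "&quot;")
--         .replace("'", "&#39;")
--     )
--
--
-- def _is_bullet(raw: str) -> bool:
--     s = raw.strip()
--     return s.startswith("* ") or s.startswith("- ")
--
--
-- def _normalize_ai_html(content: str, fallback: str) -> str:
--     if not content or not content.strip():
--         return fallback
--
--     trimmed = content.strip()
--
--     if "<" in trimmed and "</" in trimmed:
--         if trimmed.lower().startswith("<div"):
--             return trimmed
--         return f"<div>{trimmed}</div>"
--
--     lines = trimmed.splitlines()
--
--     # No bullets anywhere: single escaped paragraph, no line-by-line output.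
--     if not any(_is_bullet(l) for l in lines):
--         return f"<div><p>{_escape_html(trimmed)}</p></div>"
--
--     # Emit runs of consecutive same-kind lines.
--     parts = ["<div>"]
--     i, n = 0, len(lines)
--     while i < n:
--         flag = _is_bullet(lines[i])
--         j = i
--         while j < n and _is_bullet(lines[j]) == flag:
--             j += 1
--         run = lines[i:j]
--         if flag:
--             parts.append("<ul>")
--             for raw in run:
--                 parts.append(f"<li>{_escape_html(raw.strip()[2:].strip())}</li>")
--             parts.append("</ul>")
--         else:
--             for raw in run:
--                 s = raw.strip()
--                 parts.append("<br>" if s == "" else f"<p>{_escape_html(s)}</p>")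
--         i = j
--     parts.append("</div>")
--     return "\n".join(parts)
-- ===== Notes on version B (the rewrite author's own statement) =====
-- stated objective: alternative
-- what changed: Replaces A's per-line state machine (in_list/saw_bullets flags with deferred </ul> closing and a discarded output list when no bullets were seen) by a bullet pre-scan that returns the single-paragraph form immediately, plus emission over maximal runs of same-kind lines (each bullet run wrapped in <ul>...</ul> at once).
import Mathlib
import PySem

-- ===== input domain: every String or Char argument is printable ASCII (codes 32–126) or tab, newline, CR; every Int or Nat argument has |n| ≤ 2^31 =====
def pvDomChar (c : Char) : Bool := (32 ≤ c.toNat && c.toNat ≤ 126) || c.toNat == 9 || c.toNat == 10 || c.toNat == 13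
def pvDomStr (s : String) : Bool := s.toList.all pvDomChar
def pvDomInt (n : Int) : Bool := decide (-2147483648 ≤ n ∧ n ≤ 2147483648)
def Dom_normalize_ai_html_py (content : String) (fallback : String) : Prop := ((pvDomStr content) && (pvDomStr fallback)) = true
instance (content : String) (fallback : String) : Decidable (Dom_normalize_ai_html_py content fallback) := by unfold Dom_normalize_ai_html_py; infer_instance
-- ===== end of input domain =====

-- B replaces A's per-line in_list/saw_bullets state machine by a bullet pre-scan plus
-- emission over maximal runs of same-kind lines; return values agree everywhere (no side effects).

-- ===== PORT A =====
-- _escape_html (module helper used by both implementations)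
def escape_html_py (s : String) : String :=
  PySem.Str.replace
    (PySem.Str.replace
      (PySem.Str.replace
        (PySem.Str.replace
          (PySem.Str.replace s "&" "&amp;")
          "<" "&lt;")
        ">" "&gt;")
      "\"" "&quot;")
    "'" "&#39;"

-- one iteration of A's for-loop; state = (out, in_list, saw_bullets)
def aStep (st : List String × Bool × Bool) (raw : String) : List String × Bool × Bool :=
  let line := PySem.Str.rstrip raw
  let stripped := PySem.Str.lstrip line
  let is_bullet := PySem.Str.startswith stripped "* " || PySem.Str.startswith stripped "- "
  if is_bullet then
    let out := if !st.2.1 then st.1 ++ ["<ul>"] else st.1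
    (out ++ ["<li>" ++ escape_html_py (PySem.Str.strip (PySem.Str.slice stripped (some 2) none)) ++ "</li>"], true, true)
  else
    let out := if st.2.1 then st.1 ++ ["</ul>"] else st.1
    if stripped == "" then (out ++ ["<br>"], false, st.2.2)
    else (out ++ ["<p>" ++ escape_html_py stripped ++ "</p>"], false, st.2.2)

def normalize_ai_html_py (content : String) (fallback : String) : String :=
  if content == "" || PySem.Str.strip content == "" then fallback
  else
    let trimmed := PySem.Str.strip content
    if PySem.Str.isIn "<" trimmed && PySem.Str.isIn "</" trimmed then
      if PySem.Str.startswith (PySem.Str.lower trimmed) "<div" then trimmed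
      else "<div>" ++ trimmed ++ "</div>"
    else
      let lines := PySem.Str.splitlines trimmed
      let st := lines.foldl aStep (["<div>"], false, false)
      let out := (if st.2.1 then st.1 ++ ["</ul>"] else st.1) ++ ["</div>"]
      if !st.2.2 then "<div><p>" ++ escape_html_py trimmed ++ "</p></div>"
      else PySem.Str.join "\n" out

-- ===== PORT B =====
def is_bullet_py (raw : String) : Bool :=
  let s := PySem.Str.strip raw
  PySem.Str.startswith s "* " || PySem.Str.startswith s "- "

def bLi (raw : String) : String :=
  "<li>" ++ escape_html_py (PySem.Str.strip (PySem.Str.slice (PySem.Str.strip raw) (some 2) none)) ++ "</li>"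

def bPara (raw : String) : String :=
  let s := PySem.Str.strip raw
  if s == "" then "<br>" else "<p>" ++ escape_html_py s ++ "</p>"

-- B's run loop: each step takes the maximal run of lines with the same bullet flag
def emitRuns (lines : List String) : List String :=
  match lines with
  | [] => []
  | raw :: rest =>
    let flag := is_bullet_py raw
    let run := rest.takeWhile (fun l => is_bullet_py l == flag)
    let rest' := rest.dropWhile (fun l => is_bullet_py l == flag)
    (if flag then ["<ul>"] ++ (raw :: run).map bLi ++ ["</ul>"]
     else (raw :: run).map bPara) ++ emitRuns rest'
termination_by lines.length
decreasing_by
  simp only [List.length_cons]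
  exact Nat.lt_succ_of_le (List.length_dropWhile_le _ _)

def normalize_ai_html_py_alt (content : String) (fallback : String) : String :=
  if content == "" || PySem.Str.strip content == "" then fallback
  else
    let trimmed := PySem.Str.strip content
    if PySem.Str.isIn "<" trimmed && PySem.Str.isIn "</" trimmed then
      if PySem.Str.startswith (PySem.Str.lower trimmed) "<div" then trimmed
      else "<div>" ++ trimmed ++ "</div>"
    else
      let lines := PySem.Str.splitlines trimmed
      if !(lines.any is_bullet_py) then "<div><p>" ++ escape_html_py trimmed ++ "</p></div>"
      else PySem.Str.join "\n" (["<div>"] ++ emitRuns lines ++ ["</div>"])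

-- ===== PRECONDITION & SPEC =====
def Spec_normalize_ai_html_py (content : String) (fallback : String) (out : String) : Prop := out = normalize_ai_html_py_alt content fallback
instance (content : String) (fallback : String) (out : String) : Decidable (Spec_normalize_ai_html_py content fallback out) := by unfold Spec_normalize_ai_html_py; infer_instance

-- ===== CLAIM (what is proved, stated in full; the proofs are below) =====
def Claim_equal_normalize_ai_html_py : Prop := ∀ (content : String) (fallback : String), Dom_normalize_ai_html_py content fallback → Spec_normalize_ai_html_py content fallback (normalize_ai_html_py content fallback)

-- ===== LEMMAS AND PROOFS =====

-- dropWhile from the front commutes with dropWhile from the back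
lemma dropWhile_rev_comm {α : Type} (p : α → Bool) (l : List α) :
    List.dropWhile p (List.dropWhile p l.reverse).reverse
      = (List.dropWhile p (List.dropWhile p l).reverse).reverse := by
  induction l with
  | nil => simp
  | cons x xs ih =>
    by_cases hall : List.dropWhile p xs.reverse = []
    · have hxs : List.dropWhile p xs = [] := by
        rw [List.dropWhile_eq_nil_iff] at hall ⊢
        intro a ha; exact hall a (List.mem_reverse.mpr ha)
      by_cases hx : p x <;>
        simp [List.reverse_cons, List.dropWhile_append, hall, hxs, hx]
    · have hne : (List.dropWhile p xs.reverse).isEmpty = false := by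
        simpa [List.isEmpty_iff] using hall
      by_cases hx : p x <;>
        simp [List.reverse_cons, List.dropWhile_append, hne, hx, ih]

lemma lstrip_rstrip (s : String) :
    PySem.Str.lstrip (PySem.Str.rstrip s) = PySem.Str.strip s := by
  simp [PySem.Str.lstrip, PySem.Str.rstrip, PySem.Str.strip,
    PySem.Chars.lstrip, PySem.Chars.rstrip, PySem.Chars.strip,
    dropWhile_rev_comm]

-- A's step on a bullet line, phrased with B's helpers
lemma aStep_bullet (out : List String) (inl saw : Bool) (raw : String)
    (h : is_bullet_py raw = true) :
    aStep (out, inl, saw) raw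
      = ((if inl then out else out ++ ["<ul>"]) ++ [bLi raw], true, true) := by
  simp only [is_bullet_py] at h
  simp only [aStep, lstrip_rstrip, bLi, h]
  cases inl <;> simp

-- A's step on a non-bullet line, phrased with B's helpers
lemma aStep_plain (out : List String) (inl saw : Bool) (raw : String)
    (h : is_bullet_py raw = false) :
    aStep (out, inl, saw) raw
      = ((if inl then out ++ ["</ul>"] else out) ++ [bPara raw], false, saw) := by
  simp only [is_bullet_py] at h
  simp only [aStep, lstrip_rstrip, bPara, h]
  cases inl <;> by_cases he : PySem.Str.strip raw = "" <;> simp [he]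

-- folding A over a run of bullet lines while already inside a list
lemma bulletRun (run : List String) (acc : List String)
    (h : ∀ l ∈ run, is_bullet_py l = true) :
    run.foldl aStep (acc, true, true) = (acc ++ run.map bLi, true, true) := by
  induction run generalizing acc with
  | nil => simp
  | cons r rs ih =>
    rw [List.foldl_cons, aStep_bullet _ _ _ _ (h r (by simp))]
    simp only [List.map_cons]
    rw [ih _ (fun l hl => h l (by simp [hl]))]
    simp

-- folding A over a run of non-bullet lines while not inside a list
lemma plainRun (run : List String) (acc : List String) (saw : Bool)
    (h : ∀ l ∈ run, is_bullet_py l = false) :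
    run.foldl aStep (acc, false, saw) = (acc ++ run.map bPara, false, saw) := by
  induction run generalizing acc with
  | nil => simp
  | cons r rs ih =>
    rw [List.foldl_cons, aStep_plain _ _ _ _ (h r (by simp))]
    simp only [List.map_cons]
    rw [ih _ (fun l hl => h l (by simp [hl]))]
    simp

-- main loop correspondence: A's state machine produces exactly B's run output
lemma loop_eq_aux : ∀ (n : Nat) (lines : List String), lines.length ≤ n →
    ∀ (acc : List String) (saw : Bool),
    (if (lines.foldl aStep (acc, false, saw)).2.1
      then (lines.foldl aStep (acc, false, saw)).1 ++ ["</ul>"]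
      else (lines.foldl aStep (acc, false, saw)).1) = acc ++ emitRuns lines
    ∧ (lines.foldl aStep (acc, false, saw)).2.2 = (saw || lines.any is_bullet_py) := by
  intro n
  induction n with
  | zero =>
    intro lines hlen acc saw
    have : lines = [] := List.eq_nil_of_length_eq_zero (Nat.le_zero.mp hlen)
    subst this
    simp [emitRuns]
  | succ n ih =>
    intro lines hlen acc saw
    cases lines with
    | nil => simp [emitRuns]
    | cons raw rest =>
      have hsplit : rest = rest.takeWhile (fun l => is_bullet_py l == is_bullet_py raw)
          ++ rest.dropWhile (fun l => is_bullet_py l == is_bullet_py raw) :=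
        (List.takeWhile_append_dropWhile (p := fun l => is_bullet_py l == is_bullet_py raw)
          (l := rest)).symm
      have hlen' : (rest.dropWhile (fun l => is_bullet_py l == is_bullet_py raw)).length ≤ n := by
        have h1 := List.length_dropWhile_le (fun l => is_bullet_py l == is_bullet_py raw) rest
        simp only [List.length_cons] at hlen
        omega
      have hrunq : ∀ l ∈ rest.takeWhile (fun l => is_bullet_py l == is_bullet_py raw),
          is_bullet_py l = is_bullet_py raw := by
        intro l hl
        have := List.mem_takeWhile_imp hl
        simpa using this
      rw [emitRuns]
      by_cases hf : is_bullet_py raw = true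
      · have hrun : ∀ l ∈ rest.takeWhile (fun l => is_bullet_py l == is_bullet_py raw),
            is_bullet_py l = true := fun l hl => by rw [hrunq l hl, hf]
        have h1 : (raw :: rest).foldl aStep (acc, false, saw)
            = (rest.dropWhile (fun l => is_bullet_py l == is_bullet_py raw)).foldl aStep
                (acc ++ ["<ul>"]
                  ++ (raw :: rest.takeWhile (fun l => is_bullet_py l == is_bullet_py raw)).map bLi,
                 true, true) := by
          conv_lhs => rw [show raw :: rest
            = [raw] ++ rest.takeWhile (fun l => is_bullet_py l == is_bullet_py raw)
              ++ rest.dropWhile (fun l => is_bullet_py l == is_bullet_py raw) by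
              simp [← hsplit]]
          rw [List.foldl_append, List.foldl_append]
          simp only [List.foldl_cons, List.foldl_nil]
          rw [aStep_bullet _ _ _ _ hf, if_neg (by simp)]
          rw [bulletRun _ _ hrun]
          simp
        cases hrest' : rest.dropWhile (fun l => is_bullet_py l == is_bullet_py raw) with
        | nil =>
          rw [hrest'] at h1
          rw [h1]
          simp [hf, List.append_assoc, emitRuns]
        | cons h2 t2 =>
          have hh2 : is_bullet_py h2 = false := by
            have hne : rest.dropWhile (fun l => is_bullet_py l == is_bullet_py raw) ≠ [] := by
              rw [hrest']; simp
            have hnot := List.head_dropWhile_not (fun l => is_bullet_py l == is_bullet_py raw) hne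
            have hhead : (rest.dropWhile (fun l => is_bullet_py l == is_bullet_py raw)).head hne = h2 := by
              simp [hrest']
            rw [hhead] at hnot
            simpa [hf] using hnot
          have htrans : ∀ out : List String,
              (h2 :: t2).foldl aStep (out, true, true)
                = (h2 :: t2).foldl aStep (out ++ ["</ul>"], false, true) := by
            intro out
            simp only [List.foldl_cons]
            rw [aStep_plain _ _ _ _ hh2, aStep_plain _ _ _ _ hh2]
            simp
          rw [hrest'] at h1 hlen'
          obtain ⟨ihA, ihB⟩ := ih (h2 :: t2) hlen'
            (acc ++ ["<ul>"]
              ++ (raw :: rest.takeWhile (fun l => is_bullet_py l == is_bullet_py raw)).map bLi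
              ++ ["</ul>"]) true
          constructor
          · rw [h1, htrans, ihA]
            simp [hf, List.append_assoc]
          · rw [h1, htrans, ihB]
            simp [hf]
      · have hf' : is_bullet_py raw = false := by simpa using hf
        have hrun : ∀ l ∈ rest.takeWhile (fun l => is_bullet_py l == is_bullet_py raw),
            is_bullet_py l = false := fun l hl => by rw [hrunq l hl, hf']
        have h1 : (raw :: rest).foldl aStep (acc, false, saw)
            = (rest.dropWhile (fun l => is_bullet_py l == is_bullet_py raw)).foldl aStep
                (acc ++ (raw :: rest.takeWhile (fun l => is_bullet_py l == is_bullet_py raw)).map bPara,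
                 false, saw) := by
          conv_lhs => rw [show raw :: rest
            = [raw] ++ rest.takeWhile (fun l => is_bullet_py l == is_bullet_py raw)
              ++ rest.dropWhile (fun l => is_bullet_py l == is_bullet_py raw) by
              simp [← hsplit]]
          rw [List.foldl_append, List.foldl_append]
          simp only [List.foldl_cons, List.foldl_nil]
          rw [aStep_plain _ _ _ _ hf', if_neg (by simp)]
          rw [plainRun _ _ _ hrun]
          simp
        obtain ⟨ihA, ihB⟩ := ih (rest.dropWhile (fun l => is_bullet_py l == is_bullet_py raw)) hlen'
          (acc ++ (raw :: rest.takeWhile (fun l => is_bullet_py l == is_bullet_py raw)).map bPara) saw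
        have htake : (rest.takeWhile (fun l => is_bullet_py l == is_bullet_py raw)).any
            is_bullet_py = false := by
          simp only [List.any_eq_false]
          intro x hx
          simp [hrun x hx]
        have hany : (raw :: rest).any is_bullet_py
            = (rest.dropWhile (fun l => is_bullet_py l == is_bullet_py raw)).any is_bullet_py := by
          conv_lhs => rw [List.any_cons, hf']
          rw [Bool.false_or]
          conv_lhs => rw [hsplit]
          rw [List.any_append, htake, Bool.false_or]
        constructor
        · rw [h1, ihA, hf']
          simp [List.append_assoc]
        · rw [h1, ihB, hany]

lemma loop_eq (lines : List String) (acc : List String) (saw : Bool) :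
    (if (lines.foldl aStep (acc, false, saw)).2.1
      then (lines.foldl aStep (acc, false, saw)).1 ++ ["</ul>"]
      else (lines.foldl aStep (acc, false, saw)).1) = acc ++ emitRuns lines
    ∧ (lines.foldl aStep (acc, false, saw)).2.2 = (saw || lines.any is_bullet_py) :=
  loop_eq_aux lines.length lines le_rfl acc saw

-- ===== VERDICT (by name: the statement is the Claim_ definition above) =====
theorem normalize_ai_html_py_spec : Claim_equal_normalize_ai_html_py := by
  intro content fallback _
  unfold Spec_normalize_ai_html_py normalize_ai_html_py normalize_ai_html_py_alt
  dsimp only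
  obtain ⟨hA, hB⟩ := loop_eq (PySem.Str.splitlines (PySem.Str.strip content)) ["<div>"] false
  rw [Bool.false_or] at hB
  rw [hA, hB]
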